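-- pv_equiv track=rewrite | github.com/fkshohag/All-algorithm | Codinginterview/turing/get_largest_number.py | get_largest_number
-- ===== SOURCE A (Python) =====
-- def get_largest_number(n):
--     result = [0] * (n + 1)
--     result[0] = 0
--     result[1] = 1
--
--     for i in range(1, (n // 2) + 1):
--         result[2 * i] = result[i]
--         if (2 * i + 1) <= n:
--             result[2 * i + 1] = result[i] + result[i + 1]
--     return max(result)
-- ===== SOURCE B (Python) =====
-- def get_largest_number(n):
--     def pair(k):
--         # (s(k), s(k+1)) for Stern's diatomic sequence s, computed from the bits of k
--         if k == 0:
--             return (0, 1)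
--         a, b = pair(k // 2)
--         return (a, a + b) if k % 2 == 0 else (a + b, b)
--
--     return max(pair(k)[0] for k in range(1, n + 1))
-- ===== Notes on version B (the rewrite author's own statement) =====
-- stated objective: alternative
-- what changed: A fills a length-(n+1) DP array by scattering each result[i] to positions 2i and 2i+1 and takes max() of the array; B keeps no array at all: it computes each value independently by the recursive binary pair-descent pair(k)=(s(k),s(k+1)) derived from pair(k//2) (O(log k) per value) and maximizes over k=1..n.
import Mathlib
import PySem

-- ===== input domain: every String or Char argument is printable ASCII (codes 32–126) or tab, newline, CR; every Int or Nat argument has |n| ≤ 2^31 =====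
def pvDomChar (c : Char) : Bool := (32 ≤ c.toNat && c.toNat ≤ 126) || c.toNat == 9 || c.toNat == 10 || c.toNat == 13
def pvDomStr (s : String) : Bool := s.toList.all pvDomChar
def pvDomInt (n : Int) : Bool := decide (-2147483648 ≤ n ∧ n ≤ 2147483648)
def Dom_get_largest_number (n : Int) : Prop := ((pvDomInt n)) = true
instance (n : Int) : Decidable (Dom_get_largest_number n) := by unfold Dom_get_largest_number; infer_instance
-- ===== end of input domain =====

-- B keeps no DP array: it computes each value independently by the recursive binary
-- pair-descent pair(k) = (s(k), s(k+1)) from pair(k//2), maximizing over k = 1..n;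
-- A scatters over a length-(n+1) array and takes max() of it. Alternative algorithm, same results.


-- A models the Python list 'result' by Array Int (O(1) read/write, as in CPython).
-- Every index written/read is nonnegative, and under Pre_ (1 ≤ n) it is in range, so
-- '.toNat' with 'setIfInBounds'/'getD' is exact there (outside Pre_ the Python raises
-- IndexError and nothing is claimed).

-- ===== PORT A =====
def get_largest_number (n : Int) : Int :=
  let result : Array Int := Array.replicate (n + 1).toNat 0
  let result := result.setIfInBounds 0 0
  let result := result.setIfInBounds 1 1
  let result := (PySem.List.pyRange 1 (PySem.Int.floordiv n 2 + 1) 1).foldl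
    (fun res i =>
      let t := res.getD i.toNat 0
      let res := res.setIfInBounds (2 * i).toNat t
      if 2 * i + 1 ≤ n then
        let a := res.getD i.toNat 0
        let b := res.getD (i + 1).toNat 0
        res.setIfInBounds (2 * i + 1).toNat (a + b)
      else res) result
  (PySem.List.max? result.toList (fun x => x)).getD 0

-- ===== PORT B =====
-- Source B's inner helper 'pair'. It is only ever called with k ≥ 0 (k comes from
-- range(1, n+1) and is repeatedly floor-halved), so a Nat parameter is exact;
-- on Nat, Python's k // 2 and k % 2 are Lean's k / 2 and k % 2.
def pvPair (k : Nat) : Int × Int :=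
  if k = 0 then (0, 1)
  else
    let p := pvPair (k / 2)
    if k % 2 = 0 then (p.1, p.1 + p.2) else (p.1 + p.2, p.2)
  decreasing_by exact Nat.div_lt_self (by omega) (by omega)

def get_largest_number_alt (n : Int) : Int :=
  -- max(generator) over k in range(1, n+1); Python raises ValueError on an empty
  -- range (n ≤ 0), which is outside Pre_.
  (PySem.List.max? ((PySem.List.pyRange 1 (n + 1) 1).map (fun k => (pvPair k.toNat).1))
    (fun x => x)).getD 0

-- ===== PRECONDITION & SPEC =====
-- Pre_: Python A raises IndexError for every n ≤ 0 (the seed writes result[0] and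
-- result[1] into a list of length n+1 ≤ 1); B raises ValueError there (empty max()).
def Pre_get_largest_number (n : Int) : Prop := 1 ≤ n
instance (n : Int) : Decidable (Pre_get_largest_number n) := by unfold Pre_get_largest_number; infer_instance
def pvWitness_get_largest_number : Int := 5

def Spec_get_largest_number (n : Int) (out : Int) : Prop := out = get_largest_number_alt n
instance (n : Int) (out : Int) : Decidable (Spec_get_largest_number n out) := by unfold Spec_get_largest_number; infer_instance

-- ===== CLAIM =====
def Claim_equal_get_largest_number : Prop := ∀ (n : Int), Dom_get_largest_number n → Pre_get_largest_number n → Spec_get_largest_number n (get_largest_number n)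

-- ===== LEMMAS AND PROOFS =====

-- Stern's diatomic sequence: the value A's array holds at index j, and s(k) = (pvPair k).1.
def stern : Nat → Int
  | 0 => 0
  | 1 => 1
  | (k + 2) =>
    if (k + 2) % 2 = 0 then stern ((k + 2) / 2)
    else stern ((k + 2) / 2) + stern ((k + 2) / 2 + 1)
  decreasing_by all_goals omega

lemma stern_even (k : Nat) (h : 1 ≤ k) : stern (2 * k) = stern k := by
  obtain ⟨k', rfl⟩ : ∃ k', k = k' + 1 := ⟨k - 1, by omega⟩
  rw [show 2 * (k' + 1) = (2 * k') + 2 by ring, stern]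
  have h3 : (2 * k' + 2) / 2 = k' + 1 := by omega
  simp [h3]

lemma stern_odd (k : Nat) (h : 1 ≤ k) : stern (2 * k + 1) = stern k + stern (k + 1) := by
  obtain ⟨k', rfl⟩ : ∃ k', k = k' + 1 := ⟨k - 1, by omega⟩
  rw [show 2 * (k' + 1) + 1 = (2 * k' + 1) + 2 by ring, stern]
  have h2 : ¬ ((2 * k' + 1 + 2) % 2 = 0) := by omega
  have h3 : (2 * k' + 1 + 2) / 2 = k' + 1 := by omega
  rw [if_neg h2, h3]

-- B's pair descent computes (s(k), s(k+1)).
lemma pvPair_eq (k : Nat) : pvPair k = (stern k, stern (k + 1)) := by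
  induction k using Nat.strong_induction_on with
  | _ k ih =>
    rw [pvPair]
    by_cases hk : k = 0
    · subst hk; norm_num [stern]
    · rw [if_neg hk, ih (k / 2) (Nat.div_lt_self (by omega) (by omega))]
      dsimp only
      by_cases hp : k % 2 = 0
      · rw [if_pos hp]
        have hk2 : 1 ≤ k / 2 := by omega
        have h1 : stern k = stern (k / 2) := by
          have h := stern_even (k / 2) hk2
          rw [show 2 * (k / 2) = k by omega] at h
          exact h
        have h2 : stern (k + 1) = stern (k / 2) + stern (k / 2 + 1) := by
          have h := stern_odd (k / 2) hk2
          rw [show 2 * (k / 2) + 1 = k + 1 by omega] at h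
          exact h
        rw [h1, h2]
      · rw [if_neg hp]
        by_cases hk1 : k = 1
        · subst hk1
          have e2 : stern 2 = stern 1 := by
            have h := stern_even 1 (le_refl 1)
            simpa using h
          simp [stern, e2]
        · have hk2 : 1 ≤ k / 2 := by omega
          have h1 : stern k = stern (k / 2) + stern (k / 2 + 1) := by
            have h := stern_odd (k / 2) hk2
            rw [show 2 * (k / 2) + 1 = k by omega] at h
            exact h
          have h2 : stern (k + 1) = stern (k / 2 + 1) := by
            have h := stern_even (k / 2 + 1) (by omega)
            rw [show 2 * (k / 2 + 1) = k + 1 by omega] at h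
            exact h
          rw [h1, h2]

-- the list after the entries at indices 0..c have been filled, rest still 0
def g (N c : Nat) : List Int :=
  (List.range (N + 1)).map (fun j => if j ≤ c then stern j else 0)

lemma g_getD (N c j : Nat) (hj : j ≤ N) :
    (g N c).getD j 0 = if j ≤ c then stern j else 0 := by
  simp [g, List.getD_eq_getElem?_getD, List.getElem?_map, List.getElem?_range (by omega : j < N+1)]

lemma g_set (N c : Nat) (_h : c + 1 ≤ N) :
    (g N c).set (c + 1) (stern (c + 1)) = g N (c + 1) := by
  apply List.ext_getElem
  · simp [g]
  · intro i h1 h2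
    have hi : i < N + 1 := by simpa [g] using h2
    simp only [g, List.getElem_set, List.getElem_map, List.getElem_range]
    by_cases hic : c + 1 = i
    · subst hic
      rw [if_pos rfl, if_pos (le_refl _)]
    · rw [if_neg hic]
      by_cases hle : i ≤ c
      · rw [if_pos hle, if_pos (by omega)]
      · rw [if_neg hle, if_neg (by omega)]

-- Array.getD on a list-backed array is List.getD
lemma arr_getD (l : List Int) (k : Nat) (d : Int) : (l.toArray).getD k d = l.getD k d := by
  unfold Array.getD
  split
  · next h =>
    have hk : k < l.length := by simpa using h
    rw [List.getD_eq_getElem l d hk]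
    simp
  · next h =>
    have hk : ¬ k < l.length := by simpa using h
    rw [List.getD_eq_getElem?_getD, List.getElem?_eq_none (by omega), Option.getD_none]

lemma g_init (N : Nat) (_h : 1 ≤ N) :
    ((Array.replicate ((N : Int) + 1).toNat (0 : Int)).setIfInBounds 0 0).setIfInBounds 1 1
      = (g N 1).toArray := by
  have hrep : Array.replicate ((N : Int) + 1).toNat (0 : Int)
      = (List.replicate (N + 1) (0 : Int)).toArray := by
    apply Array.toList_inj.mp
    rw [Array.toList_replicate, List.toList_toArray,
        show ((N : Int) + 1).toNat = N + 1 by omega]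
  rw [hrep, List.setIfInBounds_toArray, List.setIfInBounds_toArray]
  congr 1
  apply List.ext_getElem
  · simp [g]
  · intro i hh1 hh2
    have hi : i < N + 1 := by simpa using hh1
    simp only [g, List.getElem_set, List.getElem_map, List.getElem_range,
      List.getElem_replicate]
    rcases i with _ | _ | i
    · simp [stern]
    · simp [stern]
    · rw [if_neg (by omega : ¬ (1:Nat) = i+1+1), if_neg (by omega : ¬ (0:Nat) = i+1+1),
        if_neg (by omega : ¬ i+1+1 ≤ 1)]

-- A's loop: after the iterations i = 1..m the array holds stern on indices 0..min(2m+1,N)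
lemma loopA (N : Nat) (hN : 1 ≤ N) (m : Nat) (hm : m ≤ N / 2) :
    (PySem.List.pyRange 1 ((m : Int) + 1) 1).foldl
      (fun res i =>
        let t := res.getD i.toNat 0
        let res := res.setIfInBounds (2 * i).toNat t
        if 2 * i + 1 ≤ (N : Int) then
          let a := res.getD i.toNat 0
          let b := res.getD (i + 1).toNat 0
          res.setIfInBounds (2 * i + 1).toNat (a + b)
        else res) (g N 1).toArray
      = (g N (min (2 * m + 1) N)).toArray := by
  induction m with
  | zero =>
    rw [PySem.List.pyRange_one_eq_nil (by norm_num)]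
    simp only [List.foldl_nil]
    congr 2
    omega
  | succ m ih =>
    have hm' : m ≤ N / 2 := by omega
    have h2 : 2 * m + 2 ≤ N := by omega
    have hcast : ((m + 1 : Nat) : Int) + 1 = ((m : Int) + 1) + 1 := by push_cast; ring
    rw [hcast, PySem.List.pyRange_one_succ_right (by omega), List.foldl_append, ih hm']
    rw [show min (2 * m + 1) N = 2 * m + 1 by omega]
    simp only [List.foldl_cons, List.foldl_nil]
    have e3 : ((m : Int) + 1) = ((m + 1 : Nat) : Int) := by push_cast; ring
    simp only [e3]
    have e1 : 2 * ((m + 1 : Nat) : Int) = ((2 * m + 2 : Nat) : Int) := by push_cast; ring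
    have e4 : ((m + 1 : Nat) : Int) + 1 = ((m + 2 : Nat) : Int) := by push_cast; ring
    simp only [e1, e4, Int.toNat_natCast, List.setIfInBounds_toArray, arr_getD]
    have e5 : ((2 * m + 2 : Nat) : Int) + 1 = ((2 * m + 3 : Nat) : Int) := by push_cast; ring
    simp only [e5, Int.toNat_natCast, Nat.cast_le]
    rw [g_getD N (2*m+1) (m+1) (by omega), if_pos (by omega : m+1 ≤ 2*m+1)]
    have hst1 : stern (2*m+2) = stern (m+1) := by
      rw [show 2*m+2 = 2*(m+1) by ring, stern_even (m+1) (by omega)]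
    have hset1 : (g N (2*m+1)).set (2*m+2) (stern (m+1)) = g N (2*m+2) := by
      have hs := g_set N (2*m+1) (by omega)
      rw [show (2*m+1)+1 = 2*m+2 by ring, hst1] at hs
      exact hs
    rw [hset1]
    by_cases hodd : 2 * m + 3 ≤ N
    · rw [if_pos hodd]
      rw [g_getD N (2*m+2) (m+1) (by omega), if_pos (by omega : m+1 ≤ 2*m+2),
          g_getD N (2*m+2) (m+2) (by omega), if_pos (by omega : m+2 ≤ 2*m+2)]
      have hst2 : stern (2*m+3) = stern (m+1) + stern (m+2) := by
        rw [show 2*m+3 = 2*(m+1)+1 by ring, stern_odd (m+1) (by omega)]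
      have hset2 : (g N (2*m+2)).set (2*m+3) (stern (m+1) + stern (m+2)) = g N (2*m+3) := by
        have hs := g_set N (2*m+2) (by omega)
        rw [show (2*m+2)+1 = 2*m+3 by ring, hst2] at hs
        exact hs
      rw [hset2]
      congr 2
      omega
    · rw [if_neg hodd]
      congr 2
      omega

-- max() over A's finished array equals the running max of stern over 1..N
lemma maxA (N : Nat) (hN : 1 ≤ N) :
    (PySem.List.max? (g N N) (fun x => x)).getD 0
      = ((List.range' 2 (N - 1)).map stern).foldl max 1 := by
  have hg : g N N = 0 :: 1 :: (List.range' 2 (N - 1)).map stern := by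
    unfold g
    rw [List.range_eq_range', show N + 1 = (N - 1) + 1 + 1 by omega,
        List.range'_succ, List.range'_succ]
    simp only [List.map_cons]
    rw [if_pos (by omega), if_pos (by omega)]
    norm_num [stern]
    intro a h1 h2 h3
    omega
  rw [hg, PySem.List.max?_id_cons]
  simp

-- B's maximized list is stern over 1..N, so its max() is the same running max
lemma maxB (N : Nat) (hN : 1 ≤ N) :
    (PySem.List.max? ((PySem.List.pyRange 1 ((N : Int) + 1) 1).map
        (fun k => (pvPair k.toNat).1)) (fun x => x)).getD 0
      = ((List.range' 2 (N - 1)).map stern).foldl max 1 := by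
  have hs1 : stern 1 = 1 := by simp [stern]
  have hlist : (PySem.List.pyRange 1 ((N : Int) + 1) 1).map (fun k => (pvPair k.toNat).1)
      = (List.range' 1 N).map stern := by
    rw [PySem.List.pyRange_one, show ((N : Int) + 1 - 1).toNat = N by omega,
        List.map_map, List.range'_eq_map_range, List.map_map]
    apply List.map_congr_left
    intro a ha
    have hto : ((1 : Int) + (a : Int)).toNat = 1 + a := by omega
    simp [Function.comp, hto, pvPair_eq]
  rw [hlist, show N = (N - 1) + 1 by omega, List.range'_succ, List.map_cons,
      PySem.List.max?_id_cons]
  simp [hs1]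

-- ===== VERDICT (by name: the statement is the Claim_ definition above) =====
theorem get_largest_number_spec : Claim_equal_get_largest_number := by
  intro n _ hpre
  unfold Spec_get_largest_number
  unfold Pre_get_largest_number at hpre
  obtain ⟨N, rfl⟩ : ∃ N : Nat, n = (N : Int) := ⟨n.toNat, by omega⟩
  have hN : 1 ≤ N := by exact_mod_cast hpre
  simp only [get_largest_number, get_largest_number_alt]
  rw [g_init N hN]
  have ediv : PySem.Int.floordiv ((N : Nat) : Int) 2 = ((N / 2 : Nat) : Int) := by
    exact_mod_cast PySem.Int.floordiv_natCast N 2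
  rw [ediv, loopA N hN (N / 2) (le_refl _),
      show min (2 * (N / 2) + 1) N = N by omega, List.toList_toArray, maxA N hN, maxB N hN]
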